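-- pv_equiv track=rewrite | github.com/bdaves/codelearn | travelapp/first.py | sortLocations
-- ===== SOURCE A (Python) =====
-- def sortLocations(order, locations):
--     new_locations = dict()
--
--     for idx, location_guid in enumerate(order):
--         new_locations[location_guid] = idx
--
--     result = [None] * len(order)
--
--     for location in locations:
--         if location['guid'] in new_locations:
--             result[new_locations[location['guid']]] = location
--         else:
--             result.append(location)
--
--     return [location for location in result if location]
-- ===== SOURCE B (Python) =====
-- def sortLocations(order, locations):
--     pos = {guid: i for i, guid in enumerate(order)}
--     known = {}
--     unknown = []
--     for location in locations:
--         i = pos.get(location['guid'])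
--         if i is None:
--             unknown.append(location)
--         else:
--             known[i] = location
--     return [known[i] for i in sorted(known)] + unknown
-- ===== Notes on version B (the rewrite author's own statement) =====
-- stated objective: alternative
-- what changed: B replaces A's None-preallocated positional slot array and trailing truthiness filter with a sparse dict of known locations keyed by order index plus an unknown list, reconstructing the result by iterating the sorted keys; Pre_ excludes only locations without a 'guid' key, on which A raises KeyError.
import Mathlib
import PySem

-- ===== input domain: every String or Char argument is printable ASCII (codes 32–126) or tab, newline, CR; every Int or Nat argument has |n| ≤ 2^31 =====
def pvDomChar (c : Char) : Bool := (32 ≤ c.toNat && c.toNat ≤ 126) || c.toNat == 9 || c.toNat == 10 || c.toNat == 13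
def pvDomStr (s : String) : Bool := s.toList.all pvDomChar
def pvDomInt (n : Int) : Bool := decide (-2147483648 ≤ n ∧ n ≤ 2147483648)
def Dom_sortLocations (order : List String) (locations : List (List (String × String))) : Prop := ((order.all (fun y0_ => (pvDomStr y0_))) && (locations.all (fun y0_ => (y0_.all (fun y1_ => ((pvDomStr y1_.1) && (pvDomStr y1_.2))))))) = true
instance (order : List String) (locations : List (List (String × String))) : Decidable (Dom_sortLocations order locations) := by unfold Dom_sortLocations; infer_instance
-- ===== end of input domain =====

-- B replaces A's None-preallocated positional slot array and trailing truthiness filter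
-- by a sparse dict of known locations keyed by order index plus an unknown list,
-- reconstructed over the sorted keys; objective: alternative (not faster).

-- ===== PORT A =====
-- location['guid'] (shared by both ports): KeyError when absent is excluded by Pre_,
-- under which getD "" is exact.
def pvGuidA (loc : List (String × String)) : String :=
  (PySem.Dict.get? (PySem.Dict.mk loc) "guid").getD ""

def sortLocations (order : List String) (locations : List (List (String × String))) : List (List (String × String)) :=
  -- for idx, location_guid in enumerate(order): new_locations[location_guid] = idx
  let new_locations : PySem.Dict String Int :=
    (PySem.List.enumerate order).foldl (fun d p => d.insert p.2 p.1) (PySem.Dict.mk [])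
  -- result = [None] * len(order)
  let result0 : List (Option (List (String × String))) := List.replicate order.length none
  -- the loop; "location['guid'] in new_locations" then the lookup = one match on get?
  let result := locations.foldl (fun res location =>
    match new_locations.get? (pvGuidA location) with
    | some idx => PySem.List.pySetD res idx (some location)  -- idx is always in range
    | none => res ++ [some location]) result0
  -- [location for location in result if location]: drops None and empty dicts
  result.filterMap (fun o => match o with
    | some l => if l.isEmpty then none else some l
    | none => none)

-- ===== PORT B =====
def sortLocations_alt (order : List String) (locations : List (List (String × String))) : List (List (String × String)) :=
  -- pos = {guid: i for i, guid in enumerate(order)}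
  let pos : PySem.Dict String Int :=
    (PySem.List.enumerate order).foldl (fun d p => d.insert p.2 p.1) PySem.Dict.empty
  -- the loop: i = pos.get(location['guid']); None → unknown.append, else known[i] = location
  let st := locations.foldl
    (fun (st : PySem.Dict Int (List (String × String)) × List (List (String × String))) location =>
      match pos.get? (pvGuidA location) with
      | none => (st.1, st.2 ++ [location])
      | some i => (st.1.insert i location, st.2)) (PySem.Dict.empty, [])
  -- [known[i] for i in sorted(known)] + unknown; each i is a key of known, so getD [] is exact
  (PySem.List.sorted st.1.keys (fun x => x) false).map (fun i => st.1.getD i []) ++ st.2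

-- ===== PRECONDITION & SPEC =====
-- Pre_ excludes exactly the inputs where A raises KeyError: a location without a 'guid' key.
def Pre_sortLocations (order : List String) (locations : List (List (String × String))) : Prop :=
  locations.all (fun loc => loc.any (fun p => p.1 == "guid")) = true
instance (order : List String) (locations : List (List (String × String))) : Decidable (Pre_sortLocations order locations) := by unfold Pre_sortLocations; infer_instance

def pvWitness_sortLocations : List String × (List (List (String × String))) :=
  (["a", "b"], [[("guid", "b"), ("x", "1")], [("guid", "z")]])

def Spec_sortLocations (order : List String) (locations : List (List (String × String))) (out : List (List (String × String))) : Prop := out = sortLocations_alt order locations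
instance (order : List String) (locations : List (List (String × String))) (out : List (List (String × String))) : Decidable (Spec_sortLocations order locations out) := by unfold Spec_sortLocations; infer_instance

-- ===== CLAIM (what is proved, stated in full; the proofs are below) =====
def Claim_equal_sortLocations : Prop := ∀ (order : List String) (locations : List (List (String × String))), Dom_sortLocations order locations → Pre_sortLocations order locations → Spec_sortLocations order locations (sortLocations order locations)

-- ===== LEMMAS AND PROOFS =====

-- Closed form of the guid→index dict: get? g is the index of the LAST occurrence of g.
theorem pv_dict_get_enum (xs : List String) (s : Int) (d : PySem.Dict String Int) (g : String) :
    ((PySem.List.enumerate xs s).foldl (fun d p => d.insert p.2 p.1) d).get? g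
      = match PySem.List.index? xs.reverse g with
        | some j => some (s + (xs.length : Int) - 1 - (j : Int))
        | none => d.get? g := by
  induction xs generalizing s d with
  | nil => simp [PySem.List.enumerate, PySem.List.index?]
  | cons x xs ih =>
    rw [PySem.List.enumerate_cons]
    simp only [List.foldl_cons, List.reverse_cons]
    rw [ih]
    by_cases hg : g ∈ xs.reverse
    · rw [PySem.List.index?_append_of_mem _ hg]
      rcases Option.isSome_iff_exists.mp ((PySem.List.index?_isSome_iff xs.reverse g).mpr hg)
        with ⟨j, hj⟩
      rw [hj]
      simp only [List.length_cons]
      congr 1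
      push_cast
      ring
    · have h0 : PySem.List.index? xs.reverse g = none :=
        (PySem.List.index?_eq_none_iff _ _).mpr hg
      rw [h0]
      by_cases hx : x = g
      · subst hx
        rw [PySem.List.index?_append_singleton_self _ _ hg]
        rw [PySem.Dict.get?_insert_self]
        simp only [List.length_reverse, List.length_cons]
        congr 1
        push_cast
        ring
      · have hni : g ∉ xs.reverse ++ [x] := by
          intro hmem
          rcases List.mem_append.mp hmem with h1 | h1
          · exact hg h1
          · exact hx (List.mem_singleton.mp h1).symm
        rw [(PySem.List.index?_eq_none_iff _ _).mpr hni,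
            PySem.Dict.get?_insert_of_ne _ _ (fun h : g = x => hx h.symm)]

-- if index? order.reverse g = some j then j < order.length
theorem pv_index_lt {order : List String} {g : String} {j : Nat}
    (h : PySem.List.index? order.reverse g = some j) : j < order.length := by
  rcases PySem.List.getElem_of_index?_eq_some h with ⟨hk, -, -⟩
  simpa using hk

-- the dict's values are indices into order
theorem pv_get_bound {order : List String} {g : String} {x : Int}
    (h : ((PySem.List.enumerate order).foldl (fun d p => d.insert p.2 p.1)
        (PySem.Dict.mk [])).get? g = some x) : 0 ≤ x ∧ x < (order.length : Int) := by
  rw [pv_dict_get_enum] at h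
  cases he : PySem.List.index? order.reverse g with
  | some j =>
    rw [he] at h
    have := pv_index_lt he
    simp only [Option.some_inj] at h
    omega
  | none =>
    rw [he] at h
    exact absurd h (by simp [PySem.Dict.get?])

-- proof-side model of A's slot updates
def pvUpdSlots (p : List (String × String) → Option Int) :
    List (List (String × String)) → List (Option (List (String × String))) →
      List (Option (List (String × String)))
  | [], s => s
  | l :: ls, s =>
      pvUpdSlots p ls (match p l with
        | some i => s.set i.toNat (some l)
        | none => s)

theorem pv_length_updSlots (p) (ls : List (List (String × String)))
    (s : List (Option (List (String × String)))) :
    (pvUpdSlots p ls s).length = s.length := by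
  induction ls generalizing s with
  | nil => rfl
  | cons l ls ih =>
    unfold pvUpdSlots
    cases p l <;> simp [ih]

-- A's main loop splits: slot updates stay in the prefix, unknowns are appended in order
theorem pv_foldA_eq (p : List (String × String) → Option Int)
    (locs : List (List (String × String)))
    (slots tail : List (Option (List (String × String))))
    (hp : ∀ l x, p l = some x → 0 ≤ x ∧ x < (slots.length : Int)) :
    locs.foldl (fun res location =>
        match p location with
        | some idx => PySem.List.pySetD res idx (some location)
        | none => res ++ [some location]) (slots ++ tail)
      = pvUpdSlots p locs slots ++ tail
          ++ (locs.filter (fun l => (p l).isNone)).map some := by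
  induction locs generalizing slots tail with
  | nil => simp [pvUpdSlots]
  | cons l ls ih =>
    simp only [List.foldl_cons]
    cases hl : p l with
    | some i =>
      obtain ⟨h0, hlen⟩ := hp l i hl
      dsimp only
      rw [PySem.List.pySetD_of_nonneg _ _ h0]
      have hset : (slots ++ tail).set i.toNat (some l)
          = slots.set i.toNat (some l) ++ tail := by
        rw [List.set_append]
        simp only [if_pos (by omega : i.toNat < slots.length)]
      rw [hset, ih (slots.set i.toNat (some l)) tail
            (by simpa using hp)]
      simp [pvUpdSlots, hl]
    | none =>
      dsimp only
      have hstep : slots ++ tail ++ [some l] = slots ++ (tail ++ [some l]) := by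
        simp
      rw [hstep, ih slots (tail ++ [some l])
            (by simpa using hp)]
      simp [pvUpdSlots, hl]

-- pointwise value of the slots: the LAST location written to slot i wins
theorem pv_updSlots_getElem? (p : List (String × String) → Option Int)
    (hp : ∀ l x, p l = some x → 0 ≤ x)
    (locs : List (List (String × String)))
    (slots : List (Option (List (String × String)))) (i : Nat) (hi : i < slots.length) :
    (pvUpdSlots p locs slots)[i]?
      = ((locs.reverse.find? (fun l => p l == some (i : Int))).map some).or slots[i]? := by
  induction locs generalizing slots with
  | nil => simp [pvUpdSlots]
  | cons l ls ih =>
    unfold pvUpdSlots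
    cases hl : p l with
    | some x =>
      dsimp only
      have hx0 := hp l x hl
      rw [ih (slots.set x.toNat (some l)) (by simpa using hi)]
      rw [List.reverse_cons, List.find?_append]
      cases hf : ls.reverse.find? (fun l => p l == some (i : Int)) with
      | some l' => simp
      | none =>
        simp only [Option.map_none, Option.none_or]
        by_cases hxi : x = (i : Int)
        · have hfl : List.find? (fun l => p l == some (i : Int)) [l] = some l := by
            simp [hl, hxi]
          rw [hfl]
          simp [show x.toNat = i by omega, hi]
        · have hfl : List.find? (fun l => p l == some (i : Int)) [l] = none := by
            simp [hl, hxi]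
          rw [hfl]
          simp [show ¬ x.toNat = i by omega]
    | none =>
      dsimp only
      rw [ih slots hi]
      rw [List.reverse_cons, List.find?_append]
      cases hf : ls.reverse.find? (fun l => p l == some (i : Int)) with
      | some l' => simp
      | none =>
        have hfl : List.find? (fun l => p l == some (i : Int)) [l] = none := by
          simp [hl]
        rw [hfl]
        simp

-- the fully-updated slots as a map over the order indices
theorem pv_updSlots_replicate (p : List (String × String) → Option Int)
    (hp : ∀ l x, p l = some x → 0 ≤ x)
    (locs : List (List (String × String))) (n : Nat) :
    pvUpdSlots p locs (List.replicate n none)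
      = (List.range n).map (fun i : Nat => locs.reverse.find? (fun l => p l == some ((i : Nat) : Int))) := by
  apply List.ext_getElem?
  intro i
  by_cases hi : i < n
  · rw [pv_updSlots_getElem? p hp locs _ i (by simpa using hi)]
    rw [List.getElem?_map, List.getElem?_range]
    simp only [if_pos hi, List.getElem?_replicate, Option.map_some]
    cases locs.reverse.find? (fun l => p l == some ((i : Nat) : Int)) <;> simp
    exact hi
  · rw [List.getElem?_eq_none (by simpa [pv_length_updSlots] using Nat.le_of_not_lt hi),
        List.getElem?_eq_none (by simpa using Nat.le_of_not_lt hi)]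

-- a list of present locations survives A's truthiness filter unchanged
theorem pv_filterMap_some (us : List (List (String × String)))
    (h : ∀ u ∈ us, u.isEmpty = false) :
    (us.map some).filterMap (fun o =>
        match o with
        | some l => if l.isEmpty then none else some l
        | none => none) = us := by
  induction us with
  | nil => rfl
  | cons u us ih =>
    have hu0 : u.isEmpty = false := h u List.mem_cons_self
    have hrec := ih (fun v hv => h v (List.mem_cons_of_mem _ hv))
    simp only [List.map_cons, List.filterMap_cons, hu0, hrec]
    simp

-- a location admitted by Pre_ is a non-empty dict
theorem pv_nonempty {loc : List (String × String)}
    (h : loc.any (fun p => p.1 == "guid") = true) : loc.isEmpty = false := by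
  cases loc <;> simp_all

-- B's pair-state loop splits into the known-dict fold and the unknown filter
theorem pv_pair_fold (p : List (String × String) → Option Int)
    (locs : List (List (String × String)))
    (d : PySem.Dict Int (List (String × String))) (u : List (List (String × String))) :
    locs.foldl (fun st location =>
        match p location with
        | none => (st.1, st.2 ++ [location])
        | some i => (st.1.insert i location, st.2)) (d, u)
      = (locs.foldl (fun d location =>
            match p location with
            | none => d
            | some i => d.insert i location) d,
         u ++ locs.filter (fun l => (p l).isNone)) := by
  induction locs generalizing d u with
  | nil => simp
  | cons l ls ih =>
    simp only [List.foldl_cons, List.filter_cons]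
    cases hl : p l with
    | none => simpa [hl] using ih d (u ++ [l])
    | some i => simpa [hl] using ih (d.insert i l) u

-- the known dict's lookup: the LAST location mapped to index i wins
theorem pv_foldK_get? (p : List (String × String) → Option Int)
    (locs : List (List (String × String)))
    (d : PySem.Dict Int (List (String × String))) (i : Int) :
    (locs.foldl (fun d location =>
        match p location with
        | none => d
        | some j => d.insert j location) d).get? i
      = (locs.reverse.find? (fun l => p l == some i)).or (d.get? i) := by
  induction locs generalizing d with
  | nil => simp
  | cons l ls ih =>
    simp only [List.foldl_cons, List.reverse_cons, List.find?_append]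
    cases hl : p l with
    | some x =>
      dsimp only
      rw [ih]
      cases hf : ls.reverse.find? (fun l => p l == some i) with
      | some l' => simp
      | none =>
        by_cases hxi : x = i
        · subst hxi
          simp [hl, PySem.Dict.get?_insert_self]
        · have : i ≠ x := fun h => hxi h.symm
          simp [hl, hxi, PySem.Dict.get?_insert_of_ne _ _ this]
    | none =>
      dsimp only
      rw [ih]
      simp [hl]

-- keys stay unique through the known-dict fold
theorem pv_foldK_nodup (p : List (String × String) → Option Int)
    (locs : List (List (String × String)))
    (d : PySem.Dict Int (List (String × String))) (hd : d.keys.Nodup) :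
    (locs.foldl (fun d location =>
        match p location with
        | none => d
        | some j => d.insert j location) d).keys.Nodup := by
  induction locs generalizing d with
  | nil => exact hd
  | cons l ls ih =>
    simp only [List.foldl_cons]
    cases hl : p l with
    | none => exact ih d hd
    | some j => exact ih _ (PySem.Dict.nodup_keys_insert _ _ _ hd)

-- map-a-total-lookup over the present indices = filterMap of the partial lookup
theorem pv_filter_map_getD {β : Type} (l : List Int) (f : Int → Option β) (dflt : β) :
    (l.filter (fun i => (f i).isSome)).map (fun i => (f i).getD dflt)
      = l.filterMap f := by
  induction l with
  | nil => rfl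
  | cons i l ih =>
    simp only [List.filter_cons, List.filterMap_cons]
    cases hf : f i <;> simp [hf, ih]

theorem sortLocations_spec_aux (order : List String)
    (locations : List (List (String × String)))
    (hpre : Pre_sortLocations order locations) :
    sortLocations order locations = sortLocations_alt order locations := by
  unfold Pre_sortLocations at hpre
  simp only [List.all_eq_true] at hpre
  simp only [sortLocations, sortLocations_alt]
  -- shared notation
  set P : List (String × String) → Option Int := fun location =>
    ((PySem.List.enumerate order).foldl (fun d p => d.insert p.2 p.1)
        (PySem.Dict.mk [])).get? (pvGuidA location) with hP
  have hPB : ∀ location,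
      ((PySem.List.enumerate order).foldl (fun d p => d.insert p.2 p.1)
          PySem.Dict.empty).get? (pvGuidA location) = P location := fun _ => rfl
  have hbound : ∀ l x, P l = some x → 0 ≤ x ∧ x < (order.length : Int) := by
    intro l x hx
    exact pv_get_bound hx
  -- ===== A's side =====
  have hboundA : ∀ l x, P l = some x
      → 0 ≤ x ∧ x < (((List.replicate order.length
            (none : Option (List (String × String)))).length : Nat) : Int) := by
    intro l x hx
    simpa using hbound l x hx
  have hA := pv_foldA_eq P locations (List.replicate order.length none) [] hboundA
  simp only [List.append_nil] at hA
  rw [hA, pv_updSlots_replicate P (fun l x hx => (hbound l x hx).1) locations order.length,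
      List.filterMap_append]
  -- ===== B's side =====
  simp only [hPB]
  rw [pv_pair_fold P locations PySem.Dict.empty [], List.nil_append]
  set K : PySem.Dict Int (List (String × String)) :=
    locations.foldl (fun d location =>
        match P location with
        | none => d
        | some j => d.insert j location) PySem.Dict.empty with hK
  have hKget : ∀ i : Int, K.get? i
      = locations.reverse.find? (fun l => P l == some i) := by
    intro i
    rw [hK, pv_foldK_get?]
    simp [PySem.Dict.get?_empty]
  -- sorted keys of K = the present indices of range n, in order
  have hsorted : PySem.List.sorted K.keys (fun x => x) false
      = ((List.range order.length).map (fun k : Nat => ((k : Nat) : Int))).filter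
          (fun i => (K.get? i).isSome) := by
    apply PySem.List.sorted_eq_of_perm_of_pairwise_lt
    · refine (List.perm_ext_iff_of_nodup ?_ ?_).mpr ?_
      · -- the filtered range is nodup
        apply List.Nodup.filter
        exact List.nodup_range.map (fun a b h => by exact_mod_cast h)
      · -- keys of K are nodup
        rw [hK]
        exact pv_foldK_nodup P locations PySem.Dict.empty
          PySem.Dict.nodup_keys_empty
      intro i
      constructor
      · intro hi
        rcases List.mem_filter.mp hi with ⟨him, hs⟩
        by_contra hcon
        rw [← PySem.Dict.get?_eq_none_iff_not_mem_keys K i] at hcon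
        rw [hcon] at hs
        exact absurd hs (by simp)
      · intro hi
        have hs : (K.get? i).isSome := by
          cases hg : K.get? i with
          | none =>
            exact absurd ((PySem.Dict.get?_eq_none_iff_not_mem_keys K i).mp hg) (by simpa using hi)
          | some v => rfl
        refine List.mem_filter.mpr ⟨?_, hs⟩
        -- i is one of the indices 0..n-1
        rcases Option.isSome_iff_exists.mp hs with ⟨l, hl⟩
        have hfind := hKget i
        rw [hl] at hfind
        have hl' := List.find?_some hfind.symm
        rw [beq_iff_eq] at hl'
        obtain ⟨h0, hn⟩ := hbound l i hl'
        refine List.mem_map.mpr ⟨i.toNat, ?_, by omega⟩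
        exact List.mem_range.mpr (by omega)
    · -- the filtered range is strictly increasing
      apply List.Pairwise.filter
      refine List.pairwise_map.mpr ?_
      exact List.pairwise_lt_range.imp (fun h => by exact_mod_cast h)
  rw [hsorted]
  have hgetD : (fun i => K.getD i []) = fun i => (K.get? i).getD [] := by
    funext i
    exact PySem.Dict.getD_eq_get?_getD _ _ _
  rw [hgetD, pv_filter_map_getD _ (fun i => K.get? i) []]
  dsimp only
  congr 1
  · -- the two prefixes agree
    rw [List.filterMap_map, List.filterMap_map]
    apply List.filterMap_congr
    intro i _
    simp only [Function.comp_apply, hKget]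
    cases hf : locations.reverse.find? (fun l => P l == some ((i : Nat) : Int)) with
    | none => rfl
    | some l =>
      have hmem : l ∈ locations := by
        have := List.mem_of_find?_eq_some hf
        simpa using this
      simp [pv_nonempty (hpre l hmem)]
  · -- the two suffixes agree
    exact pv_filterMap_some _ (fun u hu' => pv_nonempty (hpre u (List.mem_of_mem_filter hu')))

-- ===== VERDICT (by name: the statement is the Claim_ definition above) =====
theorem sortLocations_spec : Claim_equal_sortLocations := by
  intro order locations _ hpre
  unfold Spec_sortLocations
  exact sortLocations_spec_aux order locations hpre
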